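-- pv_equiv track=rewrite | github.com/aneeshraman97/ai_problems | arc.py | validate_attack
-- ===== SOURCE A (Python) =====
-- N = 8
--
-- board = [[0, 0, 0, 0, 0, 0, 0, 0],
--          [0, 0, 0, 0, 0, 0, 0, 0],
--          [0, 0, 0, 0, 0, 0, 0, 0],
--          [0, 0, 0, 0, 0, 0, 0, 0],
--          [0, 0, 0, 0, 1, 0, 0, 0],
--          [0, 0, 0, 0, 0, 0, 0, 0],
--          [0, 0, 0, 0, 0, 0, 0, 0],
--          [0, 0, 0, 0, 0, 0, 0, 0]
--          ]
--
-- def validate_attack(board, row, col):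
--
--     for j in range(N):
--         if(board[row][j] == 1 or board[j][col] == 1):
--             return True
--
--     for i in range(N):
--         for j in range(N):
--             if((i+j == row+col) or (i-j == row-col)):
--                 if(board[i][j] == 1):
--                     return True
--
--
--     return False
-- ===== SOURCE B (Python) =====
-- N = 8
--
-- def validate_attack(board, row, col):
--     # row of the target square
--     for j in range(N):
--         if board[row][j] == 1:
--             return True
--     # column of the target square
--     for i in range(N):
--         if board[i][col] == 1:
--             return True
--     # anti-diagonal (i + j == row + col): walk only its cells
--     s = row + col
--     for i in range(max(0, s - (N - 1)), min(N - 1, s) + 1):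
--         if board[i][s - i] == 1:
--             return True
--     # main diagonal (i - j == row - col): walk only its cells
--     d = row - col
--     for i in range(max(0, d), min(N - 1, (N - 1) + d) + 1):
--         if board[i][i - d] == 1:
--             return True
--     return False
-- ===== Notes on version B (the rewrite author's own statement) =====
-- stated objective: alternative
-- what changed: A's second phase scans all 64 board cells and filters by the diagonal equations; B instead walks only the cells of the two diagonals through (row,col) with directly computed index ranges, and checks row and column in two separate single-index loops.
-- outside the precondition, e.g. on validate_attack([[0, 0], [1, 0]], 0, 0): A returns True, B raises IndexError
import Mathlib
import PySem

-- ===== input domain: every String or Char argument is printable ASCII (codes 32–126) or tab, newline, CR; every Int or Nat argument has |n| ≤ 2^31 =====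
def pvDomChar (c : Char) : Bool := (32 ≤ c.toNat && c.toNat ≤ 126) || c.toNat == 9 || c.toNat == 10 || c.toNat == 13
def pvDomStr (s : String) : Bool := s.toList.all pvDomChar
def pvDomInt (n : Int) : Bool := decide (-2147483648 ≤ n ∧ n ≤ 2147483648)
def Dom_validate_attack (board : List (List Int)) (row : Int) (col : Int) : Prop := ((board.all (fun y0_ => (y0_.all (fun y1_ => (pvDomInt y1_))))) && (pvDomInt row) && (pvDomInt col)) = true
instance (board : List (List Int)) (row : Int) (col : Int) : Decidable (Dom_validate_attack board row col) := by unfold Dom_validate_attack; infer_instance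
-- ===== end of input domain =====

-- B replaces A's O(N^2) scan of the whole 8×8 grid for diagonal cells by direct walks
-- along the two diagonals through (row,col) (alternative decomposition; equal return values).

-- board[i][j] (Python indexing, negative indices wrap); exact inside Pre_, where every access is in range
def pvCell (board : List (List Int)) (i j : Int) : Int :=
  PySem.List.pyGetD (PySem.List.pyGetD board i []) j 0

-- ===== PORT A =====
def validate_attack (board : List (List Int)) (row : Int) (col : Int) : Bool :=
  ((PySem.List.pyRange 0 8 1).any fun j =>
      pvCell board row j == 1 || pvCell board j col == 1)
  || ((PySem.List.pyRange 0 8 1).any fun i => (PySem.List.pyRange 0 8 1).any fun j =>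
      (i + j == row + col || i - j == row - col) && pvCell board i j == 1)

-- ===== PORT B =====
def validate_attack_alt (board : List (List Int)) (row : Int) (col : Int) : Bool :=
  ((PySem.List.pyRange 0 8 1).any fun j => pvCell board row j == 1)
  || ((PySem.List.pyRange 0 8 1).any fun i => pvCell board i col == 1)
  || ((PySem.List.pyRange (max 0 (row + col - 7)) (min 7 (row + col) + 1) 1).any fun i =>
      pvCell board i (row + col - i) == 1)
  || ((PySem.List.pyRange (max 0 (row - col)) (min 7 (7 + (row - col)) + 1) 1).any fun i =>
      pvCell board i (i - (row - col)) == 1)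

-- ===== PRECONDITION & SPEC =====
-- Pre_ admits exactly: a safe prefix of A's scan up to a 1 in the target row (branch 1) or in the
-- target column with the row fully readable (branch 2), or a fully in-range 8×8 scan (branch 3);
-- it excludes inputs where Python A raises IndexError, and (slightly narrower than that reason)
-- a few inputs where an early `return True` fires before an access B's different scan order needs.
def Pre_validate_attack (board : List (List Int)) (row : Int) (col : Int) : Prop :=
  PySem.Raise.InRange board.length row ∧
  ((∃ j ∈ PySem.List.pyRange 0 8 1,
      PySem.Raise.InRange ((PySem.List.pyGet? board row).getD []).length j ∧
      PySem.List.pyGetD ((PySem.List.pyGet? board row).getD []) j 0 = 1 ∧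
      ∀ j' ∈ PySem.List.pyRange 0 j 1, PySem.Raise.InRange board.length j' ∧
        PySem.Raise.InRange ((PySem.List.pyGet? board j').getD []).length col)
   ∨ (8 ≤ ((PySem.List.pyGet? board row).getD []).length ∧
      ∃ j ∈ PySem.List.pyRange 0 8 1,
        PySem.Raise.InRange board.length j ∧
        PySem.Raise.InRange ((PySem.List.pyGet? board j).getD []).length col ∧
        PySem.List.pyGetD ((PySem.List.pyGet? board j).getD []) col 0 = 1 ∧
        ∀ j' ∈ PySem.List.pyRange 0 j 1, PySem.Raise.InRange board.length j' ∧
          PySem.Raise.InRange ((PySem.List.pyGet? board j').getD []).length col)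
   ∨ (8 ≤ board.length ∧ 8 ≤ ((PySem.List.pyGet? board row).getD []).length ∧
      ∀ r ∈ board.take 8, 8 ≤ r.length ∧ PySem.Raise.InRange r.length col))
instance (board : List (List Int)) (row : Int) (col : Int) : Decidable (Pre_validate_attack board row col) := by unfold Pre_validate_attack; infer_instance

def pvWitness_validate_attack : List (List Int) × Int × Int :=
  ([[0,0,0,0,0,0,0,0],[0,0,0,0,0,0,0,0],[0,0,0,0,0,0,0,0],[0,0,0,0,0,0,0,0],
    [0,0,0,0,1,0,0,0],[0,0,0,0,0,0,0,0],[0,0,0,0,0,0,0,0],[0,0,0,0,0,0,0,0]], 2, 3)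

def Spec_validate_attack (board : List (List Int)) (row : Int) (col : Int) (out : Bool) : Prop := out = validate_attack_alt board row col
instance (board : List (List Int)) (row : Int) (col : Int) (out : Bool) : Decidable (Spec_validate_attack board row col out) := by unfold Spec_validate_attack; infer_instance

-- ===== CLAIM (what is proved, stated in full; the proofs are below) =====
def Claim_equal_validate_attack : Prop := ∀ (board : List (List Int)) (row : Int) (col : Int), Dom_validate_attack board row col → Pre_validate_attack board row col → Spec_validate_attack board row col (validate_attack board row col)

-- ===== LEMMAS AND PROOFS =====

theorem pv_eq (board : List (List Int)) (row col : Int) :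
    validate_attack board row col = validate_attack_alt board row col := by
  rw [Bool.eq_iff_iff]
  simp only [validate_attack, validate_attack_alt, Bool.or_eq_true, List.any_eq_true,
    PySem.List.mem_pyRange_one, Bool.and_eq_true, beq_iff_eq, or_assoc]
  constructor
  · rintro (⟨j, hj, (h | h)⟩ | ⟨i, hi, j, hj, hor, hc⟩)
    · exact Or.inl ⟨j, hj, h⟩
    · exact Or.inr (Or.inl ⟨j, hj, h⟩)
    · rcases hor with hor | hor
      · refine Or.inr (Or.inr (Or.inl ⟨i, ⟨by omega, by omega⟩, ?_⟩))
        have : row + col - i = j := by omega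
        rw [this]; exact hc
      · refine Or.inr (Or.inr (Or.inr ⟨i, ⟨by omega, by omega⟩, ?_⟩))
        have : i - (row - col) = j := by omega
        rw [this]; exact hc
  · rintro (⟨j, hj, h⟩ | ⟨i, hi, h⟩ | ⟨i, hi, h⟩ | ⟨i, hi, h⟩)
    · exact Or.inl ⟨j, hj, Or.inl h⟩
    · exact Or.inl ⟨i, hi, Or.inr h⟩
    · exact Or.inr ⟨i, ⟨by omega, by omega⟩, row + col - i, ⟨by omega, by omega⟩,
        Or.inl (by omega), h⟩
    · exact Or.inr ⟨i, ⟨by omega, by omega⟩, i - (row - col), ⟨by omega, by omega⟩,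
        Or.inr (by omega), h⟩

-- ===== VERDICT (by name: the statement is the Claim_ definition above) =====
theorem validate_attack_spec : Claim_equal_validate_attack := by
  intro board row col _ _
  exact pv_eq board row col
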